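-- pv_equiv track=rewrite | github.com/AJAYPUNIA/daily-coding-practice | python/arrays/function to find the most frequent word in a sentence..py | most_freq_word
-- ===== SOURCE A (Python) =====
-- def most_freq_word(sentence):
--     sentence = sentence.split()
--     most_freq = {}
--     for word in sentence:
--         if word in most_freq:
--             most_freq[word]+=1
--         else:
--             most_freq[word] = 1
--     return max(most_freq ,key = most_freq.get)
-- ===== SOURCE B (Python) =====
-- def most_freq_word(sentence):
--     words = sentence.split()
--     return max(words, key=words.count)
-- ===== Notes on version B (the rewrite author's own statement) =====
-- stated objective: simpler
-- what changed: B drops the frequency-dictionary build and the keyed max over the dict keys, instead taking max over the word list itself with list.count as key (repeated scanning instead of a counting table); first-occurrence tie-breaking coincides.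
import Mathlib
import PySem

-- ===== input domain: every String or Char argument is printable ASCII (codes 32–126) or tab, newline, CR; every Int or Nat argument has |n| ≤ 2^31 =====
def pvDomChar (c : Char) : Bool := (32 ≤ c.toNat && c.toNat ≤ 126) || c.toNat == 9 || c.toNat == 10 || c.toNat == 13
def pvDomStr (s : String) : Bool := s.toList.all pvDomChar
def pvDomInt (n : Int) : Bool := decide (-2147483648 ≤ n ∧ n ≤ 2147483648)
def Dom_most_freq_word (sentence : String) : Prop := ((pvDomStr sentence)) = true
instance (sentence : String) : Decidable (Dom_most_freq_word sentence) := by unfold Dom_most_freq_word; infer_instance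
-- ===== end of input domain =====

-- B replaces A's frequency-dictionary build plus keyed max over the dict by a single
-- max over the word list itself with list.count as the key (simpler, not faster).

-- ===== PORT A =====
def most_freq_word (sentence : String) : String :=
  let words := PySem.Str.split₀ sentence
  let most_freq := words.foldl
    (fun d word =>
      if d.contains word then d.modify word 0 (· + 1)
      else d.insert word 1)
    (PySem.Dict.empty : PySem.Dict String Int)
  -- max(most_freq, key=most_freq.get); raises ValueError on an empty dict (excluded by Pre_)
  (PySem.List.max? most_freq.keys (fun k => most_freq.getD k 0)).getD ""

-- ===== PORT B =====
def most_freq_word_alt (sentence : String) : String :=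
  let words := PySem.Str.split₀ sentence
  -- max(words, key=words.count); raises ValueError on an empty list (excluded by Pre_)
  (PySem.List.max? words (fun w => PySem.List.count words w)).getD ""

-- ===== PRECONDITION & SPEC =====
-- Pre_ excludes only sentences with no words (whitespace-only), where Python's max([]) raises ValueError in both A and B.
def Pre_most_freq_word (sentence : String) : Prop := PySem.Str.split₀ sentence ≠ []
instance (sentence : String) : Decidable (Pre_most_freq_word sentence) := by unfold Pre_most_freq_word; infer_instance
def pvWitness_most_freq_word : String := "the cat and the dog"

def Spec_most_freq_word (sentence : String) (out : String) : Prop := out = most_freq_word_alt sentence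
instance (sentence : String) (out : String) : Decidable (Spec_most_freq_word sentence out) := by unfold Spec_most_freq_word; infer_instance

-- ===== CLAIM (what is proved, stated in full; the proofs are below) =====
def Claim_equal_most_freq_word : Prop := ∀ (sentence : String), Dom_most_freq_word sentence → Pre_most_freq_word sentence → Spec_most_freq_word sentence (most_freq_word sentence)

-- ===== LEMMAS AND PROOFS =====

-- A's counting loop (contains-test, then += / = 1) is exactly Counter(words).
theorem pv_fold_eq_counter (words : List String) :
    words.foldl
      (fun d word =>
        if d.contains word then d.modify word 0 (· + 1)
        else d.insert word 1)
      (PySem.Dict.empty : PySem.Dict String Int) = PySem.Dict.counter words := by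
  rw [PySem.Dict.counter_eq_foldl]
  apply PySem.List.foldl_congr_mem
  intro d word _
  by_cases h : d.contains word
  · simp [h]
  · have h' : d.contains word = false := by simpa using h
    simp [h', PySem.Dict.modify, PySem.Dict.getD_of_not_contains d 0 h']

-- max? over a Nat-valued key cast to Int is max? over the Nat key.
theorem pv_max?_cast (xs : List String) (f : String → Nat) :
    PySem.List.max? xs (fun a => (f a : Int)) = PySem.List.max? xs f := by
  unfold PySem.List.max?
  apply PySem.List.foldl_congr_mem
  intro acc x _
  cases acc with
  | none => rfl
  | some m => simp [Nat.cast_lt]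

-- max with a key over l + one more element steps the running max once.
theorem pv_max?_append_singleton (l : List String) (x : String) (key : String → Nat) :
    PySem.List.max? (l ++ [x]) key =
      (PySem.List.max? l key).elim (some x) (fun m => if key m < key x then some x else some m) := by
  unfold PySem.List.max?
  rw [List.foldl_append, List.foldl_cons, List.foldl_nil]
  generalize List.foldl _ none l = acc
  cases acc <;> rfl

-- Python's max with a key picks the FIRST extremal element, so taking it over the
-- deduplicated key list (first occurrences, in order) agrees with taking it over the list.
theorem pv_max?_ofList (xs : List String) (key : String → Nat) :
    PySem.List.max? (PySem.Set.ofList xs) key = PySem.List.max? xs key := by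
  induction xs using List.reverseRecOn with
  | nil => rfl
  | append_singleton xs x ih =>
    rw [PySem.Set.ofList_append_singleton, pv_max?_append_singleton]
    by_cases hx : x ∈ xs
    · rw [PySem.Set.add_of_mem (by simpa [PySem.Set.mem_ofList] using hx), ih]
      obtain ⟨m, hm⟩ : ∃ m, PySem.List.max? xs key = some m := by
        rcases h : PySem.List.max? xs key with _ | m
        · exact absurd ((PySem.List.max?_eq_none_iff xs key).mp h) (List.ne_nil_of_mem hx)
        · exact ⟨m, rfl⟩
      have hle : key x ≤ key m := PySem.List.max?_isMax hm x hx
      simp [hm, Nat.not_lt.mpr hle]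
    · rw [PySem.Set.add_of_not_mem (by simpa [PySem.Set.mem_ofList] using hx),
        pv_max?_append_singleton, ih]

-- ===== VERDICT (by name: the statement is the Claim_ definition above) =====
theorem pv_main (words : List String) :
    (PySem.List.max?
      (words.foldl
        (fun d word =>
          if d.contains word then d.modify word 0 (· + 1)
          else d.insert word 1)
        (PySem.Dict.empty : PySem.Dict String Int)).keys
      (fun k =>
        (words.foldl
          (fun d word =>
            if d.contains word then d.modify word 0 (· + 1)
            else d.insert word 1)
          (PySem.Dict.empty : PySem.Dict String Int)).getD k 0)).getD "" =
    (PySem.List.max? words (fun w => PySem.List.count words w)).getD "" := by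
  rw [pv_fold_eq_counter, PySem.Dict.keys_counter]
  have hkey : (fun k => (PySem.Dict.counter words).getD k 0) =
      (fun k => ((List.count k words : Nat) : Int)) := by
    funext k; exact PySem.Dict.getD_counter _ k
  rw [hkey, pv_max?_cast, pv_max?_ofList]
  rfl

theorem most_freq_word_spec : Claim_equal_most_freq_word := by
  intro sentence _ _
  exact pv_main (PySem.Str.split₀ sentence)
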